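-- pv_equiv track=rewrite | github.com/Robel-Roba-Ditta/LeetCode | 1772-create-sorted-array-through-instructions/create-sorted-array-through-instructions.py | createSortedArray
-- ===== SOURCE A (Python) =====
-- def createSortedArray(ins):
--     m = max(ins)
--     bit = [0] * (m + 1)
--     def upd(i):
--         while i <= m:
--             bit[i] += 1
--             i += i & -i
--     def qry(i):
--         s = 0
--         while i > 0:
--             s += bit[i]
--             i -= i & -i
--         return s
--     res = 0
--     mod = 10**9 + 7
--     for i, x in enumerate(ins):
--         l = qry(x - 1)
--         r = i - qry(x)
--         res = (res + min(l, r)) % mod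
--         upd(x)
--     return res
-- ===== SOURCE B (Python) =====
-- def createSortedArray(ins):
--     # Maintain the already-seen elements as a sorted list; binary search gives
--     # the number of smaller / larger elements directly (no Fenwick tree).
--     mod = 10 ** 9 + 7
--     arr = []
--     res = 0
--     for x in ins:
--         lo, hi = 0, len(arr)
--         while lo < hi:              # bisect_left by hand (no imports in this module)
--             mid = (lo + hi) // 2
--             if arr[mid] < x:
--                 lo = mid + 1
--             else:
--                 hi = mid
--         l = lo
--         hi = len(arr)
--         while lo < hi:              # bisect_right, continued from l
--             mid = (lo + hi) // 2
--             if arr[mid] <= x: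
--                 lo = mid + 1
--             else:
--                 hi = mid
--         r = len(arr) - lo
--         res = (res + (l if l < r else r)) % mod
--         arr.insert(lo, x)
--     return res
-- ===== Notes on version B (the rewrite author's own statement) =====
-- stated objective: alternative
-- what changed: Replaces the Fenwick tree (bit-index while-loops over a value-indexed array of size max(ins)+1) by a sorted list of the elements seen so far, with hand-written binary searches for the counts and positional insert; memory drops from O(max(ins)) to O(n).
import Mathlib
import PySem

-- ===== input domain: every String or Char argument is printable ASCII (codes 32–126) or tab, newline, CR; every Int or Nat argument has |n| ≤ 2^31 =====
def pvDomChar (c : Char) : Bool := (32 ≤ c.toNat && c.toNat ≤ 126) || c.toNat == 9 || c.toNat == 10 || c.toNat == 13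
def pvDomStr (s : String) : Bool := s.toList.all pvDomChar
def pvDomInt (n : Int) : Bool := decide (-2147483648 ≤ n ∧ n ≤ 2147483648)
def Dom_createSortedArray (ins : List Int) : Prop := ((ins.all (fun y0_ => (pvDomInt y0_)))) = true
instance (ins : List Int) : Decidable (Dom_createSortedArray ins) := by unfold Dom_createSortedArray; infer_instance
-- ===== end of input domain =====

-- B replaces A's Fenwick tree (value-indexed bit array of size max(ins)+1 walked by
-- lowbit index arithmetic) with a sorted list of the seen elements queried by binary
-- search; equivalence is proved on nonempty lists of positive ints (elsewhere A raises
-- or loops forever).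

-- ===== PORT A =====

-- lowest set bit of n (`n & -n` for n ≥ 0), used to state termination of A's while-loops
def pvLbNat : Nat → Nat
  | 0 => 0
  | n + 1 => if (n + 1) % 2 = 1 then 1 else 2 * pvLbNat ((n + 1) / 2)
decreasing_by omega

theorem pvLbNat_odd (n : Nat) (h : n % 2 = 1) : pvLbNat n = 1 := by
  cases n with
  | zero => omega
  | succ m => simp [pvLbNat, h]

theorem pvLbNat_even (n : Nat) (h : n % 2 = 0) : pvLbNat n = 2 * pvLbNat (n / 2) := by
  cases n with
  | zero => simp [pvLbNat]
  | succ m => rw [pvLbNat]; simp [h]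

theorem pvLbNat_pos : ∀ n : Nat, 0 < n → 0 < pvLbNat n := by
  intro n
  induction n using Nat.strong_induction_on with
  | _ n ih =>
    intro h
    rcases Nat.even_or_odd n with ⟨k, hk⟩ | ⟨k, hk⟩
    · rw [pvLbNat_even n (by omega)]
      have := ih (n / 2) (by omega) (by omega)
      omega
    · rw [pvLbNat_odd n (by omega)]; omega

theorem pvLbNat_le : ∀ n : Nat, pvLbNat n ≤ n := by
  intro n
  induction n using Nat.strong_induction_on with
  | _ n ih =>
    rcases Nat.eq_zero_or_pos n with h0 | hp
    · subst h0; simp [pvLbNat]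
    rcases Nat.even_or_odd n with ⟨k, hk⟩ | ⟨k, hk⟩
    · rw [pvLbNat_even n (by omega)]
      have := ih (n / 2) (by omega)
      omega
    · rw [pvLbNat_odd n (by omega)]; omega

-- Nat.land recursion on parity (bridge from Nat.bitwise)
theorem pvLand_two_mul_add (a b : Nat) (ba bb : Bool) :
    (2 * a + ba.toNat) &&& (2 * b + bb.toNat) = 2 * (a &&& b) + (ba && bb).toNat := by
  have h := Nat.bitwise_bit (f := and) (a := ba) (m := a) (b := bb) (n := b)
  cases ba <;> cases bb <;>
    simp [HAnd.hAnd, AndOp.and, Nat.land, Nat.bit, Bool.toNat] at h ⊢ <;> omega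

-- n & (n-1) clears the lowest set bit
theorem pvLand_pred : ∀ n : Nat, 0 < n → n &&& (n - 1) = n - pvLbNat n := by
  intro n
  induction n using Nat.strong_induction_on with
  | _ n ih =>
    intro h
    rcases Nat.even_or_odd n with he | ho
    · obtain ⟨k, hk⟩ := he
      have hk2 : n = 2 * k := by omega
      subst hk2
      have hkpos : 0 < k := by omega
      have hih := ih k (by omega) hkpos
      have hlb := pvLbNat_le k
      have h1 : 2 * k - 1 = 2 * (k - 1) + 1 := by omega
      rw [h1]
      have step : (2 * k + (false : Bool).toNat) &&& (2 * (k - 1) + (true : Bool).toNat)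
          = 2 * (k &&& (k - 1)) + ((false && true : Bool)).toNat :=
        pvLand_two_mul_add k (k - 1) false true
      simp at step
      have he2 : pvLbNat (2 * k) = 2 * pvLbNat k := by
        rw [pvLbNat_even (2 * k) (by omega), Nat.mul_div_cancel_left _ (by norm_num : 0 < 2)]
      omega
    · obtain ⟨k, hk⟩ := ho
      subst hk
      have h1 : 2 * k + 1 - 1 = 2 * k := by omega
      rw [h1]
      have step : (2 * k + (true : Bool).toNat) &&& (2 * k + (false : Bool).toNat)
          = 2 * (k &&& k) + ((true && false : Bool)).toNat :=
        pvLand_two_mul_add k k true false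
      simp [Nat.and_self] at step
      have ho2 : pvLbNat (2 * k + 1) = 1 := pvLbNat_odd (2 * k + 1) (by omega)
      omega

-- Python's `i & -i` (ported exactly as PySem.Int.band) equals the lowest set bit for i > 0
theorem pvBand_neg_self (i : Int) (h : 0 < i) :
    PySem.Int.band i (-i) = (pvLbNat i.toNat : Int) := by
  have hn : 0 < i.toNat := by omega
  have hle := pvLbNat_le i.toNat
  simp only [PySem.Int.band, if_pos (by omega : (0:Int) ≤ i),
    if_neg (by omega : ¬ (0:Int) ≤ -i)]
  have h1 : (-(-i) - 1).toNat = i.toNat - 1 := by omega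
  rw [h1, pvLand_pred i.toNat hn]
  omega

def pvLowbit (i : Int) : Int := PySem.Int.band i (-i)

theorem pvLowbit_pos (i : Int) (h : 0 < i) : 0 < pvLowbit i := by
  rw [pvLowbit, pvBand_neg_self i h]
  exact_mod_cast pvLbNat_pos i.toNat (by omega)

theorem pvLowbit_le (i : Int) (h : 0 < i) : pvLowbit i ≤ i := by
  rw [pvLowbit, pvBand_neg_self i h]
  have := pvLbNat_le i.toNat
  omega

-- A's `upd`: while i <= m: bit[i] += 1; i += i & -i.
-- The `0 < i` guard only makes the recursion total: under Pre_ every index reached is ≥ 1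
-- (in Python, i ≤ 0 here would loop forever or raise IndexError).
theorem pvUpd_dec (m i : Int) (h : 0 < i ∧ i ≤ m) :
    (m + 1 - (i + pvLowbit i)).toNat < (m + 1 - i).toNat := by
  have h1 := pvLowbit_pos i h.1
  omega

def pvUpd (m : Int) (bit : List Int) (i : Int) : List Int :=
  if h : 0 < i ∧ i ≤ m then
    pvUpd m (PySem.List.pySetD bit i (PySem.List.pyGetD bit i 0 + 1)) (i + pvLowbit i)
  else bit
termination_by (m + 1 - i).toNat
decreasing_by exact pvUpd_dec m i h

-- A's `qry`: s = 0; while i > 0: s += bit[i]; i -= i & -i; return s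
theorem pvQry_dec (i : Int) (h : 0 < i) : (i - pvLowbit i).toNat < i.toNat := by
  have h1 := pvLowbit_pos i h
  have h2 := pvLowbit_le i h
  omega

def pvQry (bit : List Int) (s i : Int) : Int :=
  if h : 0 < i then pvQry bit (s + PySem.List.pyGetD bit i 0) (i - pvLowbit i) else s
termination_by i.toNat
decreasing_by exact pvQry_dec i h

def createSortedArray (ins : List Int) : Int :=
  match PySem.List.max? ins (fun x => x) with
  | none => 0  -- unreachable under Pre_: Python's max([]) raises ValueError
  | some m =>
    -- bit = [0] * (m + 1)
    let bit0 : List Int := List.replicate (m + 1).toNat 0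
    let st := (PySem.List.enumerate ins 0).foldl
      (fun (st : List Int × Int) p =>
        let l := pvQry st.1 0 (p.2 - 1)
        let r := p.1 - pvQry st.1 0 p.2
        ((pvUpd m st.1 p.2), PySem.Int.mod (st.2 + min l r) 1000000007))
      (bit0, 0)
    st.2

-- ===== PORT B =====

theorem pvBis_dec1 (lo hi : Int) (h : lo < hi) :
    (hi - (PySem.Int.floordiv (lo + hi) 2 + 1)).toNat < (hi - lo).toNat := by
  have := PySem.Int.floordiv_two_mid_bounds (lo := lo) (hi := hi) (by omega)
  omega

theorem pvBis_dec2 (lo hi : Int) (h : lo < hi) :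
    (PySem.Int.floordiv (lo + hi) 2 - lo).toNat < (hi - lo).toNat := by
  have h2 : PySem.Int.floordiv (lo + hi) 2 < hi := by
    rw [PySem.Int.floordiv_lt_iff_lt_mul (by omega)]
    omega
  have := PySem.Int.floordiv_two_mid_bounds (lo := lo) (hi := hi) (by omega)
  omega

-- hand-written bisect_left loop from Source B
def pvBL (arr : List Int) (x lo hi : Int) : Int :=
  if h : lo < hi then
    let mid := PySem.Int.floordiv (lo + hi) 2
    if PySem.List.pyGetD arr mid 0 < x then pvBL arr x (mid + 1) hi
    else pvBL arr x lo mid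
  else lo
termination_by (hi - lo).toNat
decreasing_by
  · exact pvBis_dec1 lo hi h
  · exact pvBis_dec2 lo hi h

-- hand-written bisect_right loop from Source B
def pvBR (arr : List Int) (x lo hi : Int) : Int :=
  if h : lo < hi then
    let mid := PySem.Int.floordiv (lo + hi) 2
    if PySem.List.pyGetD arr mid 0 ≤ x then pvBR arr x (mid + 1) hi
    else pvBR arr x lo mid
  else lo
termination_by (hi - lo).toNat
decreasing_by
  · exact pvBis_dec1 lo hi h
  · exact pvBis_dec2 lo hi h

def createSortedArray_alt (ins : List Int) : Int :=
  (ins.foldl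
    (fun (st : List Int × Int) x =>
      let arr := st.1
      let l := pvBL arr x 0 (PySem.List.len arr)
      let lo := pvBR arr x l (PySem.List.len arr)
      let r := PySem.List.len arr - lo
      (PySem.List.insert arr lo x,
       PySem.Int.mod (st.2 + (if l < r then l else r)) 1000000007))
    ([], 0)).2

-- ===== PRECONDITION & SPEC =====
-- Pre_ excludes exactly the inputs where Python A never returns: max([]) raises ValueError
-- on the empty list, and any element ≤ 0 sends A's upd-loop into an infinite loop or an
-- IndexError (the BIT is indexed by the values themselves).
def Pre_createSortedArray (ins : List Int) : Prop := ins ≠ [] ∧ ∀ x ∈ ins, 1 ≤ x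
instance (ins : List Int) : Decidable (Pre_createSortedArray ins) := by
  unfold Pre_createSortedArray; infer_instance

def pvWitness_createSortedArray : List Int := [1, 5, 6, 2, 2, 1]

def Spec_createSortedArray (ins : List Int) (out : Int) : Prop := out = createSortedArray_alt ins
instance (ins : List Int) (out : Int) : Decidable (Spec_createSortedArray ins out) := by
  unfold Spec_createSortedArray; infer_instance

-- ===== CLAIM (what is proved, stated in full; the proofs are below) =====
def Claim_equal_createSortedArray : Prop := ∀ (ins : List Int), Dom_createSortedArray ins → Pre_createSortedArray ins → Spec_createSortedArray ins (createSortedArray ins)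

-- ===== LEMMAS AND PROOFS =====

-- ---------- lowbit on Int ----------
def pvLbI (j : Int) : Int := ((pvLbNat j.toNat : Nat) : Int)

theorem pvLbI_pos (j : Int) (h : 0 < j) : 0 < pvLbI j := by
  have := pvLbNat_pos j.toNat (by omega)
  unfold pvLbI; omega

theorem pvLbI_le (j : Int) : pvLbI j ≤ max j 0 := by
  have := pvLbNat_le j.toNat
  unfold pvLbI; omega

theorem pvLowbit_eq (i : Int) (h : 0 < i) : pvLowbit i = pvLbI i :=
  pvBand_neg_self i h

theorem pvKey1 : ∀ j : Nat, 0 < j → 2 * pvLbNat j ≤ pvLbNat (j + pvLbNat j) := by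
  intro j
  induction j using Nat.strong_induction_on with
  | _ j ih =>
    intro h
    rcases Nat.even_or_odd j with ⟨k, hk⟩ | ⟨k, hk⟩
    · have hkpos : 0 < k := by omega
      have hj : j = 2 * k := by omega
      subst hj
      have he : pvLbNat (2 * k) = 2 * pvLbNat k := by
        rw [pvLbNat_even (2 * k) (by omega), Nat.mul_div_cancel_left _ (by norm_num : 0 < 2)]
      have he2 : pvLbNat (2 * k + 2 * pvLbNat k) = 2 * pvLbNat (k + pvLbNat k) := by
        rw [pvLbNat_even (2 * k + 2 * pvLbNat k) (by omega)]
        congr 2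
        omega
      have := ih k (by omega) hkpos
      rw [he, he2]
      omega
    · have hj : pvLbNat j = 1 := pvLbNat_odd j (by omega)
      rw [hj]
      have he : pvLbNat (j + 1) = 2 * pvLbNat ((j + 1) / 2) := pvLbNat_even (j + 1) (by omega)
      have := pvLbNat_pos ((j + 1) / 2) (by omega)
      omega

theorem pvKey2 : ∀ j x : Nat, 0 < x → x < j → j - pvLbNat j < x → x + pvLbNat x ≤ j := by
  intro j
  induction j using Nat.strong_induction_on with
  | _ j ih =>
    intro x hx hxj hlow
    rcases Nat.even_or_odd x with ⟨a, ha⟩ | ⟨a, ha⟩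
    · -- x even
      have hxa : x = 2 * a := by omega
      have hapos : 0 < a := by omega
      rcases Nat.even_or_odd j with ⟨b, hb⟩ | ⟨b, hb⟩
      · have hjb : j = 2 * b := by omega
        have hlbj : pvLbNat j = 2 * pvLbNat b := by
          rw [hjb, pvLbNat_even (2 * b) (by omega), Nat.mul_div_cancel_left _ (by norm_num : 0 < 2)]
        have hlbx : pvLbNat x = 2 * pvLbNat a := by
          rw [hxa, pvLbNat_even (2 * a) (by omega), Nat.mul_div_cancel_left _ (by norm_num : 0 < 2)]
        have hbleb := pvLbNat_le b
        have := ih b (by omega) a hapos (by omega) (by omega)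
        omega
      · have hlbj : pvLbNat j = 1 := pvLbNat_odd j (by omega)
        omega
    · have hlbx : pvLbNat x = 1 := pvLbNat_odd x (by omega)
      omega

theorem pvKey1I (j : Int) (h : 0 < j) : 2 * pvLbI j ≤ pvLbI (j + pvLbI j) := by
  have h1 := pvKey1 j.toNat (by omega)
  have h2 : (j + pvLbI j).toNat = j.toNat + pvLbNat j.toNat := by unfold pvLbI; omega
  unfold pvLbI at *
  rw [h2]
  omega

theorem pvKey2I (x j : Int) (hx : 0 < x) (hxj : x < j) (hlow : j - pvLbI j < x) :
    x + pvLbI x ≤ j := by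
  have := pvKey2 j.toNat x.toNat (by omega) (by omega) (by unfold pvLbI at hlow; omega)
  unfold pvLbI at *
  omega

theorem pvGetDElem (xs : List Int) (i : Int) (h0 : 0 ≤ i) (hl : i.toNat < xs.length) :
    PySem.List.pyGetD xs i 0 = xs[i.toNat] :=
  PySem.List.pyGetD_eq_getElem xs 0 h0 (by omega)

-- ---------- the update chain ----------
def pvChain (m i : Int) : List Int :=
  if h : 0 < i ∧ i ≤ m then i :: pvChain m (i + pvLbI i) else []
termination_by (m + 1 - i).toNat
decreasing_by
  have := pvLbI_pos i h.1
  omega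

theorem pvChain_sub (m : Int) : ∀ i : Int,
    ∀ j ∈ pvChain m i, i ≤ j ∧ j ≤ m ∧ j - pvLbI j ≤ i - pvLbI i := by
  intro i
  induction i using pvChain.induct (m := m) with
  | case1 i h ih =>
    intro j hj
    rw [pvChain, dif_pos h] at hj
    rcases List.mem_cons.mp hj with rfl | hj
    · omega
    · have h2 := ih j hj
      have h3 := pvLbI_pos i h.1
      have h4 := pvKey1I i h.1
      omega
  | case2 i h =>
    intro j hj
    rw [pvChain, dif_neg h] at hj
    simp at hj
theorem pvChain_mem (m i : Int) (hi : 0 < i) (j : Int) :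
    j ∈ pvChain m i ↔ (i ≤ j ∧ j ≤ m ∧ j - pvLbI j < i) := by
  constructor
  · intro hj
    have h1 := pvChain_sub m i j hj
    have h2 := pvLbI_pos i hi
    omega
  · intro h
    obtain ⟨h1, h2, h3⟩ := h
    induction i using pvChain.induct (m := m) with
    | case1 i hc ih =>
      rw [pvChain, dif_pos hc]
      rcases eq_or_lt_of_le h1 with rfl | hlt
      · exact List.mem_cons_self
      · have h4 := pvKey2I i j hc.1 hlt h3
        have h5 := pvLbI_pos i hc.1
        refine List.mem_cons_of_mem _ ?_
        apply ih <;> omega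
    | case2 i hc =>
      exfalso
      omega

theorem pvChain_head_lt (m i : Int) (hi : 0 < i) (j : Int)
    (hj : j ∈ pvChain m (i + pvLbI i)) : i < j := by
  have h1 := pvChain_sub m (i + pvLbI i) j hj
  have h2 := pvLbI_pos i hi
  omega

-- ---------- A's upd against the chain ----------
theorem pvUpd_length (m : Int) : ∀ (bit : List Int) (i : Int),
    (pvUpd m bit i).length = bit.length := by
  intro bit i
  induction bit, i using pvUpd.induct (m := m) with
  | case1 bit i h ih =>
    rw [pvUpd, dif_pos h]
    rw [ih]
    exact PySem.List.length_pySetD _ _ _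
  | case2 bit i h => rw [pvUpd, dif_neg h]

theorem pvUpd_getD (m : Int) : ∀ (bit : List Int) (i : Int), 0 < i →
    bit.length = (m + 1).toNat → ∀ j : Int, 0 ≤ j → j ≤ m →
    PySem.List.pyGetD (pvUpd m bit i) j 0
      = PySem.List.pyGetD bit j 0 + (if j ∈ pvChain m i then 1 else 0) := by
  intro bit i
  induction bit, i using pvUpd.induct (m := m) with
  | case1 bit i h ih =>
    intro hi hlen j hj0 hjm
    rw [pvUpd, dif_pos h]
    have hlb := pvLbI_pos i h.1
    have hset : (PySem.List.pySetD bit i (PySem.List.pyGetD bit i 0 + 1)).length = bit.length :=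
      PySem.List.length_pySetD _ _ _
    rw [ih (by have := pvLowbit_eq i h.1; have := pvLbI_pos i h.1; omega)
        (by rw [hset, hlen]) j hj0 hjm]
    have hchain : pvChain m i = i :: pvChain m (i + pvLbI i) := by
      rw [pvChain, dif_pos h]
    rw [hchain]
    have hmem : ∀ j' ∈ pvChain m (i + pvLbI i), i < j' := pvChain_head_lt m i h.1
    have hupd_rest : pvChain m (i + pvLowbit i) = pvChain m (i + pvLbI i) := by
      rw [pvLowbit_eq i h.1]
    rw [hupd_rest]
    -- pyGetD after pySetD
    have hiR : i.toNat < bit.length := by omega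
    have hjR : j.toNat < bit.length := by omega
    have hsd : PySem.List.pySetD bit i (PySem.List.pyGetD bit i 0 + 1)
        = bit.set i.toNat (PySem.List.pyGetD bit i 0 + 1) := by
      apply PySem.List.pySetD_of_nonneg; omega
    have hgs : PySem.List.pyGetD (PySem.List.pySetD bit i (PySem.List.pyGetD bit i 0 + 1)) j 0
        = if j = i then PySem.List.pyGetD bit i 0 + 1 else PySem.List.pyGetD bit j 0 := by
      rw [hsd]
      by_cases hji : j = i
      · subst hji
        rw [if_pos rfl,
          pvGetDElem _ j (by omega) (by simp [List.length_set]; omega),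
          List.getElem_set_self]
      · rw [if_neg hji,
          pvGetDElem _ j hj0 (by simp [List.length_set]; omega),
          pvGetDElem bit j hj0 (by omega),
          List.getElem_set_ne (by omega)]
    rw [hgs]
    by_cases hji : j = i
    · subst hji
      have hnot : j ∉ pvChain m (j + pvLbI j) := fun hmem' => absurd (hmem j hmem') (by omega)
      rw [if_pos rfl, if_pos (List.mem_cons_self), if_neg hnot]
      omega
    · rw [if_neg hji]
      simp [List.mem_cons, hji]
  | case2 bit i h =>
    intro hi hlen j hj0 hjm
    rw [pvUpd, dif_neg h]
    have hnil : pvChain m i = [] := by rw [pvChain, dif_neg h]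
    simp [hnil]

-- ---------- counting helpers ----------
theorem pvCnt_split (l : List Int) (a b : Int) (hab : a ≤ b) :
    l.countP (fun y => decide (y ≤ b))
      = l.countP (fun y => decide (y ≤ a)) + l.countP (fun y => decide (a < y ∧ y ≤ b)) := by
  induction l with
  | nil => simp
  | cons z l ih =>
    simp only [List.countP_cons, ih, decide_eq_true_eq]
    split_ifs <;> omega

theorem pvCnt_le_zero (l : List Int) (hpos : ∀ y ∈ l, 1 ≤ y) (a : Int) (ha : a ≤ 0) :
    l.countP (fun y => decide (y ≤ a)) = 0 := by
  rw [List.countP_eq_zero]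
  intro y hy
  have := hpos y hy
  simp only [decide_eq_true_eq]
  omega

-- ---------- the Fenwick invariant ----------
def pvInv (m : Int) (seen bit : List Int) : Prop :=
  bit.length = (m + 1).toNat ∧ ∀ j : Int, 1 ≤ j → j ≤ m →
    PySem.List.pyGetD bit j 0
      = (seen.countP (fun y => decide (j - pvLbI j < y ∧ y ≤ j)) : Int)

theorem pvQry_spec (m : Int) (seen bit : List Int) (hinv : pvInv m seen bit)
    (hpos : ∀ y ∈ seen, 1 ≤ y) :
    ∀ i : Int, 0 ≤ i → i ≤ m → ∀ s : Int,
      pvQry bit s i = s + (seen.countP (fun y => decide (y ≤ i)) : Int) := by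
  suffices H : ∀ n : Nat, ∀ i : Int, i.toNat ≤ n → 0 ≤ i → i ≤ m → ∀ s : Int,
      pvQry bit s i = s + (seen.countP (fun y => decide (y ≤ i)) : Int) by
    intro i h0 hm s; exact H i.toNat i le_rfl h0 hm s
  intro n
  induction n with
  | zero =>
    intro i hin h0 hm s
    have hi0 : i = 0 := by omega
    subst hi0
    rw [pvQry, dif_neg (by omega), pvCnt_le_zero seen hpos 0 le_rfl]
    simp
  | succ n ihn =>
    intro i hin h0 hm s
    by_cases hpos' : 0 < i
    · rw [pvQry, dif_pos hpos', pvLowbit_eq i hpos']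
      have hlbp := pvLbI_pos i hpos'
      have hlble := pvLbI_le i
      rw [ihn (i - pvLbI i) (by omega) (by omega) (by omega)]
      rw [(hinv.2) i (by omega) hm]
      rw [pvCnt_split seen (i - pvLbI i) i (by omega)]
      push_cast
      ring
    · have hi0 : i = 0 := by omega
      subst hi0
      rw [pvQry, dif_neg (by omega), pvCnt_le_zero seen hpos 0 le_rfl]
      simp

theorem pvInv_upd (m : Int) (seen bit : List Int) (hinv : pvInv m seen bit)
    (x : Int) (hx1 : 1 ≤ x) (hxm : x ≤ m) :
    pvInv m (seen ++ [x]) (pvUpd m bit x) := by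
  obtain ⟨hlen, hval⟩ := hinv
  refine ⟨by rw [pvUpd_length m bit x, hlen], ?_⟩
  intro j hj1 hjm
  rw [pvUpd_getD m bit x (by omega) hlen j (by omega) hjm, hval j hj1 hjm]
  rw [List.countP_append]
  have hiff : (j ∈ pvChain m x) ↔ (j - pvLbI j < x ∧ x ≤ j) := by
    rw [pvChain_mem m x (by omega) j]
    constructor <;> intro h <;> [exact ⟨h.2.2, h.1⟩; exact ⟨h.2, hjm, h.1⟩]
  simp only [List.countP_cons, List.countP_nil, decide_eq_true_eq]
  by_cases hc : j - pvLbI j < x ∧ x ≤ j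
  · rw [if_pos (hiff.mpr hc), if_pos hc]
    push_cast
    omega
  · rw [if_neg (fun hmem => hc (hiff.mp hmem)), if_neg hc]
    push_cast
    omega

-- ---------- sorted/binary-search side ----------
theorem pvPairwise_getElem_le (arr : List Int) (hs : arr.Pairwise (· ≤ ·))
    (k₁ k₂ : Nat) (hk : k₁ ≤ k₂) (h2 : k₂ < arr.length) : arr[k₁] ≤ arr[k₂] := by
  rcases eq_or_lt_of_le hk with rfl | hlt
  · exact le_refl _
  · exact List.pairwise_iff_getElem.mp hs k₁ k₂ (by omega) h2 hlt

theorem pvCountP_of_split (p : Int → Bool) :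
    ∀ (arr : List Int) (t : Nat), t ≤ arr.length →
    (∀ k (hk : k < arr.length), k < t → p arr[k]) →
    (∀ k (hk : k < arr.length), t ≤ k → ¬ p arr[k]) →
    arr.countP p = t := by
  intro arr
  induction arr with
  | nil =>
    intro t ht _ _
    simp only [List.countP_nil, List.length_nil] at *
    omega
  | cons a l ih =>
    intro t ht h1 h2
    cases t with
    | zero =>
      simp only [List.countP_cons]
      have h0 : ¬ p a := by simpa using h2 0 (by simp) (by omega)
      rw [List.countP_eq_zero.mpr ?_]
      · simp [h0]
      · intro y hy
        obtain ⟨k, hk, rfl⟩ := List.mem_iff_getElem.mp hy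
        exact h2 (k + 1) (by simpa using hk) (by omega)
    | succ t' =>
      simp only [List.countP_cons]
      have h0 : p a := h1 0 (by simp) (by omega)
      rw [ih t' (by simpa using ht)
        (fun k hk hkt => h1 (k + 1) (by simpa using hk) (by omega))
        (fun k hk hkt => h2 (k + 1) (by simpa using hk) (by omega))]
      simp [h0]

theorem pvCountP_down (arr : List Int) (hs : arr.Pairwise (· ≤ ·)) (p : Int → Bool)
    (hdown : ∀ a b : Int, a ≤ b → p b → p a) :
    ∀ k (hk : k < arr.length), (k < arr.countP p ↔ p arr[k]) := by
  intro k hk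
  constructor
  · intro hcnt
    by_contra hnp
    have hdropz : (arr.drop k).countP p = 0 := by
      rw [List.countP_eq_zero]
      intro y hy
      obtain ⟨j, hj, rfl⟩ := List.mem_iff_getElem.mp hy
      have hjd : (arr.drop k).length = arr.length - k := List.length_drop
      rw [List.getElem_drop]
      intro hp
      exact hnp (hdown _ _ (pvPairwise_getElem_le arr hs k (k + j) (by omega) (by omega)) hp)
    have hsum := List.countP_append (l₁ := arr.take k) (l₂ := arr.drop k) (p := p)
    rw [List.take_append_drop] at hsum
    have htk : (arr.take k).countP p ≤ k :=
      le_trans List.countP_le_length (by simp [List.length_take])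
    omega
  · intro hp
    have htake : (arr.take (k + 1)).countP p = k + 1 := by
      rw [List.countP_eq_length.mpr ?_]
      · simp [List.length_take]; omega
      · intro y hy
        obtain ⟨j, hj, rfl⟩ := List.mem_iff_getElem.mp hy
        rw [List.getElem_take]
        have hjk : j ≤ k := by simp [List.length_take] at hj; omega
        exact hdown _ _ (pvPairwise_getElem_le arr hs j k hjk hk) hp
    have hsum := List.countP_append (l₁ := arr.take (k + 1)) (l₂ := arr.drop (k + 1)) (p := p)
    rw [List.take_append_drop] at hsum
    omega

theorem pvTermBase (arr : List Int) (p : Int → Bool) (lo : Int) (h0 : 0 ≤ lo)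
    (hlen : lo ≤ arr.length)
    (h1 : ∀ k (hk : k < arr.length), k < lo.toNat → p arr[k])
    (h2 : ∀ k (hk : k < arr.length), lo.toNat ≤ k → ¬ p arr[k]) :
    lo = (arr.countP p : Int) := by
  rw [pvCountP_of_split p arr lo.toNat (by omega) h1 h2]
  omega

theorem pvBL_spec (arr : List Int) (x : Int) (hs : arr.Pairwise (· ≤ ·)) :
    ∀ lo hi : Int, 0 ≤ lo → lo ≤ hi → hi ≤ arr.length →
    (∀ k (hk : k < arr.length), k < lo.toNat → arr[k] < x) →
    (∀ k (hk : k < arr.length), hi.toNat ≤ k → ¬ arr[k] < x) →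
    pvBL arr x lo hi = (arr.countP (fun y => decide (y < x)) : Int) := by
  suffices H : ∀ n : Nat, ∀ lo hi : Int, (hi - lo).toNat ≤ n → 0 ≤ lo → lo ≤ hi → hi ≤ arr.length →
      (∀ k (hk : k < arr.length), k < lo.toNat → arr[k] < x) →
      (∀ k (hk : k < arr.length), hi.toNat ≤ k → ¬ arr[k] < x) →
      pvBL arr x lo hi = (arr.countP (fun y => decide (y < x)) : Int) by
    intro lo hi a b c d e; exact H (hi - lo).toNat lo hi le_rfl a b c d e
  intro n
  induction n with
  | zero =>
    intro lo hi hn h0 hle hhi h1 h2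
    have : ¬ lo < hi := by omega
    rw [pvBL, dif_neg this]
    have heq : lo = hi := by omega
    subst heq
    exact pvTermBase arr _ lo h0 (by omega)
      (fun k hk hklo => by simpa using h1 k hk hklo)
      (fun k hk hklo => by simpa using h2 k hk hklo)
  | succ n ihn =>
    intro lo hi hn h0 hle hhi h1 h2
    by_cases hlh : lo < hi
    · rw [pvBL, dif_pos hlh]
      have hmb := PySem.Int.floordiv_two_mid_bounds (lo := lo) (hi := hi) (by omega)
      have hmlt : PySem.Int.floordiv (lo + hi) 2 < hi := by
        rw [PySem.Int.floordiv_lt_iff_lt_mul (by omega)]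
        omega
      simp only []
      rw [pvGetDElem arr (PySem.Int.floordiv (lo + hi) 2) (by omega) (by omega)]
      by_cases hm : arr[(PySem.Int.floordiv (lo + hi) 2).toNat] < x
      · rw [if_pos hm]
        refine ihn _ hi (by omega) (by omega) (by omega) hhi ?_ h2
        intro k hk hklo
        have hkm : k ≤ (PySem.Int.floordiv (lo + hi) 2).toNat := by omega
        exact lt_of_le_of_lt (pvPairwise_getElem_le arr hs k _ hkm (by omega)) hm
      · rw [if_neg hm]
        refine ihn lo _ (by omega) h0 (by omega) (by omega) h1 ?_
        intro k hk hklo hcon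
        exact hm (lt_of_le_of_lt (pvPairwise_getElem_le arr hs _ k (by omega) hk) hcon)
    · rw [pvBL, dif_neg hlh]
      have heq : lo = hi := by omega
      subst heq
      exact pvTermBase arr _ lo h0 (by omega)
        (fun k hk hklo => by simpa using h1 k hk hklo)
        (fun k hk hklo => by simpa using h2 k hk hklo)

theorem pvBR_spec (arr : List Int) (x : Int) (hs : arr.Pairwise (· ≤ ·)) :
    ∀ lo hi : Int, 0 ≤ lo → lo ≤ hi → hi ≤ arr.length →
    (∀ k (hk : k < arr.length), k < lo.toNat → arr[k] ≤ x) →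
    (∀ k (hk : k < arr.length), hi.toNat ≤ k → ¬ arr[k] ≤ x) →
    pvBR arr x lo hi = (arr.countP (fun y => decide (y ≤ x)) : Int) := by
  suffices H : ∀ n : Nat, ∀ lo hi : Int, (hi - lo).toNat ≤ n → 0 ≤ lo → lo ≤ hi → hi ≤ arr.length →
      (∀ k (hk : k < arr.length), k < lo.toNat → arr[k] ≤ x) →
      (∀ k (hk : k < arr.length), hi.toNat ≤ k → ¬ arr[k] ≤ x) →
      pvBR arr x lo hi = (arr.countP (fun y => decide (y ≤ x)) : Int) by
    intro lo hi a b c d e; exact H (hi - lo).toNat lo hi le_rfl a b c d e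
  intro n
  induction n with
  | zero =>
    intro lo hi hn h0 hle hhi h1 h2
    have : ¬ lo < hi := by omega
    rw [pvBR, dif_neg this]
    have heq : lo = hi := by omega
    subst heq
    exact pvTermBase arr _ lo h0 (by omega)
      (fun k hk hklo => by simpa using h1 k hk hklo)
      (fun k hk hklo => by simpa using h2 k hk hklo)
  | succ n ihn =>
    intro lo hi hn h0 hle hhi h1 h2
    by_cases hlh : lo < hi
    · rw [pvBR, dif_pos hlh]
      have hmb := PySem.Int.floordiv_two_mid_bounds (lo := lo) (hi := hi) (by omega)
      have hmlt : PySem.Int.floordiv (lo + hi) 2 < hi := by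
        rw [PySem.Int.floordiv_lt_iff_lt_mul (by omega)]
        omega
      simp only []
      rw [pvGetDElem arr (PySem.Int.floordiv (lo + hi) 2) (by omega) (by omega)]
      by_cases hm : arr[(PySem.Int.floordiv (lo + hi) 2).toNat] ≤ x
      · rw [if_pos hm]
        refine ihn _ hi (by omega) (by omega) (by omega) hhi ?_ h2
        intro k hk hklo
        have hkm : k ≤ (PySem.Int.floordiv (lo + hi) 2).toNat := by omega
        exact le_trans (pvPairwise_getElem_le arr hs k _ hkm (by omega)) hm
      · rw [if_neg hm]
        refine ihn lo _ (by omega) h0 (by omega) (by omega) h1 ?_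
        intro k hk hklo hcon
        exact hm (le_trans (pvPairwise_getElem_le arr hs _ k (by omega) hk) hcon)
    · rw [pvBR, dif_neg hlh]
      have heq : lo = hi := by omega
      subst heq
      exact pvTermBase arr _ lo h0 (by omega)
        (fun k hk hklo => by simpa using h1 k hk hklo)
        (fun k hk hklo => by simpa using h2 k hk hklo)

-- ---------- main loop ----------
theorem pvMinIf (a b : Int) : min a b = if a < b then a else b := by
  split_ifs <;> omega

theorem pvCnt_compl (l : List Int) (x : Int) :
    l.countP (fun y => decide (y ≤ x)) + l.countP (fun y => decide (x < y)) = l.length := by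
  induction l with
  | nil => simp
  | cons z l ihs =>
    simp only [List.countP_cons, decide_eq_true_eq, List.length_cons]
    split_ifs <;> omega

theorem pvMain (m : Int) :
    ∀ (rest seen bit arr : List Int) (res : Int),
    pvInv m seen bit → arr.Pairwise (· ≤ ·) → arr.Perm seen →
    (∀ y ∈ seen, 1 ≤ y ∧ y ≤ m) → (∀ y ∈ rest, 1 ≤ y ∧ y ≤ m) →
    ((PySem.List.enumerate rest (seen.length : Int)).foldl
      (fun (st : List Int × Int) p =>
        ((pvUpd m st.1 p.2),
         PySem.Int.mod (st.2 + min (pvQry st.1 0 (p.2 - 1)) (p.1 - pvQry st.1 0 p.2)) 1000000007))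
      (bit, res)).2
    = (rest.foldl
        (fun (st : List Int × Int) x =>
          (PySem.List.insert st.1 (pvBR st.1 x (pvBL st.1 x 0 (PySem.List.len st.1)) (PySem.List.len st.1)) x,
           PySem.Int.mod (st.2 + (if pvBL st.1 x 0 (PySem.List.len st.1) < PySem.List.len st.1 - pvBR st.1 x (pvBL st.1 x 0 (PySem.List.len st.1)) (PySem.List.len st.1) then pvBL st.1 x 0 (PySem.List.len st.1) else PySem.List.len st.1 - pvBR st.1 x (pvBL st.1 x 0 (PySem.List.len st.1)) (PySem.List.len st.1))) 1000000007))
        (arr, res)).2 := by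
  intro rest
  induction rest with
  | nil =>
    intro seen bit arr res _ _ _ _ _
    simp [PySem.List.enumerate_nil]
  | cons x rest ih =>
    intro seen bit arr res hinv hsort hperm hseen hrest
    obtain ⟨hx1, hxm⟩ := hrest x List.mem_cons_self
    have hrest' : ∀ y ∈ rest, 1 ≤ y ∧ y ≤ m :=
      fun y hy => hrest y (List.mem_cons_of_mem _ hy)
    have hposseen : ∀ y ∈ seen, 1 ≤ y := fun y hy => (hseen y hy).1
    -- counts
    have hdown1 : ∀ a b : Int, a ≤ b → decide (b < x) → decide (a < x) := by
      intro a b hab hb; simp only [decide_eq_true_eq] at *; omega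
    have hdown2 : ∀ a b : Int, a ≤ b → decide (b ≤ x) → decide (a ≤ x) := by
      intro a b hab hb; simp only [decide_eq_true_eq] at *; omega
    have ht1le : arr.countP (fun y => decide (y < x)) ≤ arr.length := List.countP_le_length
    have ht2le : arr.countP (fun y => decide (y ≤ x)) ≤ arr.length := List.countP_le_length
    have hprefix1 : ∀ k (hk : k < arr.length), k < arr.countP (fun y => decide (y < x)) →
        arr[k] < x := fun k hk hkt => by
      simpa using (pvCountP_down arr hsort _ hdown1 k hk).mp hkt
    have hprefix2 : ∀ k (hk : k < arr.length), k < arr.countP (fun y => decide (y ≤ x)) →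
        arr[k] ≤ x := fun k hk hkt => by
      simpa using (pvCountP_down arr hsort _ hdown2 k hk).mp hkt
    have hsuffix2 : ∀ k (hk : k < arr.length), arr.countP (fun y => decide (y ≤ x)) ≤ k →
        x < arr[k] := by
      intro k hk hkt
      by_contra hcon
      have := (pvCountP_down arr hsort _ hdown2 k hk).mpr (by simp only [decide_eq_true_eq]; omega)
      omega
    -- A-side query values
    have hq1 := pvQry_spec m seen bit hinv hposseen (x - 1) (by omega) (by omega) 0
    have hq2 := pvQry_spec m seen bit hinv hposseen x (by omega) hxm 0
    have hcc : seen.countP (fun y => decide (y ≤ x - 1)) = seen.countP (fun y => decide (y < x)) :=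
      List.countP_congr (fun y _ => by simp only [decide_eq_true_eq]; omega)
    -- B-side binary-search values
    have hlenA : PySem.List.len arr = (arr.length : Int) := PySem.List.len_eq arr
    have hblv : pvBL arr x 0 (PySem.List.len arr)
        = (arr.countP (fun y => decide (y < x)) : Int) := by
      rw [hlenA]
      refine pvBL_spec arr x hsort 0 (arr.length : Int) le_rfl (by omega) (by omega) ?_ ?_
      · intro k hk hklo; omega
      · intro k hk hklo; exact absurd hk (by omega)
    have hbrv : pvBR arr x (pvBL arr x 0 (PySem.List.len arr)) (PySem.List.len arr)
        = (arr.countP (fun y => decide (y ≤ x)) : Int) := by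
      rw [hblv, hlenA]
      refine pvBR_spec arr x hsort _ (arr.length : Int) (by omega) (by omega) (by omega) ?_ ?_
      · intro k hk hklo
        have hk1 : k < arr.countP (fun y => decide (y < x)) := by omega
        exact le_of_lt (hprefix1 k hk hk1)
      · intro k hk hklo; exact absurd hk (by omega)
    -- counts transfer to seen
    have hc1 : arr.countP (fun y => decide (y < x)) = seen.countP (fun y => decide (y < x)) :=
      hperm.countP_eq _
    have hc2 : arr.countP (fun y => decide (y ≤ x)) = seen.countP (fun y => decide (y ≤ x)) :=
      hperm.countP_eq _
    have hlen_eq : arr.length = seen.length := hperm.length_eq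
    -- complement count: elements > x
    have hsplit := pvCnt_compl seen x
    -- step results are equal
    rw [PySem.List.enumerate_cons, List.foldl_cons, List.foldl_cons]
    show (List.foldl _
        (pvUpd m bit x,
         PySem.Int.mod (res + min (pvQry bit 0 (x - 1)) ((seen.length : Int) - pvQry bit 0 x)) 1000000007)
        (PySem.List.enumerate rest ((seen.length : Int) + 1))).2
      = (List.foldl _
        (PySem.List.insert arr (pvBR arr x (pvBL arr x 0 (PySem.List.len arr)) (PySem.List.len arr)) x,
         PySem.Int.mod (res + (if pvBL arr x 0 (PySem.List.len arr) < PySem.List.len arr - pvBR arr x (pvBL arr x 0 (PySem.List.len arr)) (PySem.List.len arr) then pvBL arr x 0 (PySem.List.len arr) else PySem.List.len arr - pvBR arr x (pvBL arr x 0 (PySem.List.len arr)) (PySem.List.len arr))) 1000000007)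
        rest).2
    have hres : PySem.Int.mod (res + (if pvBL arr x 0 (PySem.List.len arr) < PySem.List.len arr - pvBR arr x (pvBL arr x 0 (PySem.List.len arr)) (PySem.List.len arr) then pvBL arr x 0 (PySem.List.len arr) else PySem.List.len arr - pvBR arr x (pvBL arr x 0 (PySem.List.len arr)) (PySem.List.len arr))) 1000000007
        = PySem.Int.mod (res + min (pvQry bit 0 (x - 1)) ((seen.length : Int) - pvQry bit 0 x)) 1000000007 := by
      congr 1
      rw [pvMinIf]
      split_ifs <;> omega
    rw [hres, hbrv]
    -- invariants for the next step
    have hins : PySem.List.insert arr ((arr.countP (fun y => decide (y ≤ x)) : Nat) : Int) x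
        = arr.take (arr.countP (fun y => decide (y ≤ x))) ++ x :: arr.drop (arr.countP (fun y => decide (y ≤ x))) :=
      PySem.List.insert_natCast arr _ x ht2le
    have hsortN : (PySem.List.insert arr ((arr.countP (fun y => decide (y ≤ x)) : Nat) : Int) x).Pairwise (· ≤ ·) := by
      rw [hins, List.pairwise_append]
      refine ⟨List.Pairwise.sublist (List.take_sublist _ _) hsort, ?_, ?_⟩
      · constructor
        · intro y hy
          obtain ⟨j, hj, rfl⟩ := List.mem_iff_getElem.mp hy
          have hjd : (arr.drop (arr.countP (fun y => decide (y ≤ x)))).length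
              = arr.length - arr.countP (fun y => decide (y ≤ x)) := List.length_drop
          rw [List.getElem_drop]
          exact le_of_lt (hsuffix2 _ (by omega) (by omega))
        · exact List.Pairwise.sublist (List.drop_sublist _ _) hsort
      · intro a ha b hb
        obtain ⟨j, hj, rfl⟩ := List.mem_iff_getElem.mp ha
        have hjt : (arr.take (arr.countP (fun y => decide (y ≤ x)))).length
            = min (arr.countP (fun y => decide (y ≤ x))) arr.length := List.length_take
        rw [List.getElem_take]
        have hax : arr[j] ≤ x := hprefix2 j (by omega) (by omega)
        rcases List.mem_cons.mp hb with rfl | hbd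
        · exact hax
        · obtain ⟨j2, hj2, rfl⟩ := List.mem_iff_getElem.mp hbd
          have hjd : (arr.drop (arr.countP (fun y => decide (y ≤ x)))).length
              = arr.length - arr.countP (fun y => decide (y ≤ x)) := List.length_drop
          rw [List.getElem_drop]
          exact le_trans hax (le_of_lt (hsuffix2 _ (by omega) (by omega)))
    have hpermN : (PySem.List.insert arr ((arr.countP (fun y => decide (y ≤ x)) : Nat) : Int) x).Perm (seen ++ [x]) := by
      rw [hins]
      have hmid : (arr.take (arr.countP (fun y => decide (y ≤ x))) ++ x :: arr.drop (arr.countP (fun y => decide (y ≤ x)))).Perm (x :: arr) := by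
        have h := List.perm_middle (a := x) (l₁ := arr.take (arr.countP (fun y => decide (y ≤ x))))
          (l₂ := arr.drop (arr.countP (fun y => decide (y ≤ x))))
        rwa [List.take_append_drop] at h
      exact hmid.trans ((hperm.cons x).trans (List.perm_append_singleton x seen).symm)
    have hseenN : ∀ y ∈ seen ++ [x], 1 ≤ y ∧ y ≤ m := by
      intro y hy
      rcases List.mem_append.mp hy with hy | hy
      · exact hseen y hy
      · simp at hy; subst hy; exact ⟨hx1, hxm⟩
    have happ := ih (seen ++ [x]) (pvUpd m bit x)
      (PySem.List.insert arr ((arr.countP (fun y => decide (y ≤ x)) : Nat) : Int) x)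
      (PySem.Int.mod (res + min (pvQry bit 0 (x - 1)) ((seen.length : Int) - pvQry bit 0 x)) 1000000007)
      (pvInv_upd m seen bit hinv x hx1 hxm) hsortN hpermN hseenN hrest'
    have hlen1 : (((seen ++ [x]).length : Nat) : Int) = (seen.length : Int) + 1 := by
      simp
    rw [hlen1] at happ
    exact happ

-- ===== VERDICT (by name: the statement is the Claim_ definition above) =====
theorem createSortedArray_spec : Claim_equal_createSortedArray := by
  intro ins _ hpre
  obtain ⟨hne, hpos⟩ := hpre
  unfold Spec_createSortedArray
  cases hmax : PySem.List.max? ins (fun x => x) with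
  | none => exact absurd ((PySem.List.max?_eq_none_iff ins _).mp hmax) hne
  | some m =>
    have hub := PySem.List.max?_isMax hmax
    have hmem := PySem.List.max?_mem hmax
    have hm1 : 1 ≤ m := hpos m hmem
    have hbounds : ∀ y ∈ ins, 1 ≤ y ∧ y ≤ m := fun y hy => ⟨hpos y hy, hub y hy⟩
    have hinv0 : pvInv m [] (List.replicate (m + 1).toNat 0) := by
      refine ⟨by simp, ?_⟩
      intro j hj1 hjm
      rw [pvGetDElem _ j (by omega) (by simp [List.length_replicate]; omega)]
      simp
    have hmain := pvMain m ins [] (List.replicate (m + 1).toNat 0) [] 0 hinv0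
      (by simp) (by simp) (by simp) hbounds
    simp only [List.length_nil, Nat.cast_zero] at hmain
    unfold createSortedArray
    rw [hmax]
    exact hmain
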